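-- pv_equiv track=rewrite | github.com/thepratholic/LeetCode-and-GFG-Daily-POTD | LeetCode/Maximum XOR for each query.py | getMaximumXor
-- ===== SOURCE A (Python) =====
-- from typing import List
--
-- def getMaximumXor(nums: List[int], maximumBit: int) -> List[int]:
--     answer = []
--     xor = 0
--     for i in nums:
--         xor ^= i
--
--     mask = (1 << maximumBit) - 1
--
--     for n in reversed(nums):
--         answer.append(xor ^ mask)
--         xor ^= n
--
--     return answer
-- ===== SOURCE B (Python) =====
-- from typing import List
--
-- def getMaximumXor(nums: List[int], maximumBit: int) -> List[int]:
--     # Prefix-XOR table: pre[j] = XOR of nums[0..j-1]; answer built in one forward indexed pass.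
--     pre = [0]
--     for x in nums:
--         pre.append(pre[-1] ^ x)
--     mask = (1 << maximumBit) - 1
--     n = len(nums)
--     return [pre[n - i] ^ mask for i in range(n)]
-- ===== Notes on version B (the rewrite author's own statement) =====
-- stated objective: alternative
-- what changed: Replaces A's single mutated running XOR walked over reversed(nums) with a precomputed prefix-XOR table indexed in a forward list-comprehension pass.
import Mathlib
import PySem

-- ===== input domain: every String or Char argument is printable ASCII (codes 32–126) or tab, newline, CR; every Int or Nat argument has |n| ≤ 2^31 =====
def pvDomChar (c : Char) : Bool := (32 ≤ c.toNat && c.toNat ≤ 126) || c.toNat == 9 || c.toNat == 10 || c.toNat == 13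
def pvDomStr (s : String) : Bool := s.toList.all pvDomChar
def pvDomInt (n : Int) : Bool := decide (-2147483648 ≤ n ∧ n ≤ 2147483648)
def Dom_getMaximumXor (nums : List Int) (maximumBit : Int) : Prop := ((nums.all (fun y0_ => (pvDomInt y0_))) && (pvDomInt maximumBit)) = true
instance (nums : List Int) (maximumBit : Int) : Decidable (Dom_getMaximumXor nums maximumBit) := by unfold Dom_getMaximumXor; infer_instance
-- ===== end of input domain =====

-- B replaces A's reversed walk with a mutated running XOR by a prefix-XOR table read in a forward indexed pass (alternative decomposition, same cost).


-- ===== PORT A =====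
-- xor = 0; for i in nums: xor ^= i
-- mask = (1 << maximumBit) - 1   (shift via toNat: exact for 0 ≤ maximumBit, which Pre_ demands; Python raises otherwise)
-- for n in reversed(nums): answer.append(xor ^ mask); xor ^= n
def getMaximumXor (nums : List Int) (maximumBit : Int) : List Int :=
  let xor := nums.foldl (fun x i => PySem.Int.bxor x i) 0
  let mask := ((1 : Int) <<< maximumBit.toNat) - 1
  (nums.reverse.foldl
    (fun (st : List Int × Int) n => (st.1 ++ [PySem.Int.bxor st.2 mask], PySem.Int.bxor st.2 n))
    ([], xor)).1

-- ===== PORT B =====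
-- pre = [0]; for x in nums: pre.append(pre[-1] ^ x)  (pre is never empty, so pre[-1] is its last element: getLastD is exact)
-- mask = (1 << maximumBit) - 1; return [pre[n-i] ^ mask for i in range(n)]  (0 ≤ n-i ≤ n < len(pre): getD is exact)
def getMaximumXor_alt (nums : List Int) (maximumBit : Int) : List Int :=
  let pre := nums.foldl (fun acc x => acc ++ [PySem.Int.bxor (acc.getLastD 0) x]) [0]
  let mask := ((1 : Int) <<< maximumBit.toNat) - 1
  let n := nums.length
  (List.range n).map (fun i => PySem.Int.bxor (pre.getD (n - i) 0) mask)

-- ===== PRECONDITION & SPEC =====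
-- Pre_ excludes maximumBit < 0, on which Python A raises ValueError (negative shift count).
def Pre_getMaximumXor (nums : List Int) (maximumBit : Int) : Prop := 0 ≤ maximumBit
instance (nums : List Int) (maximumBit : Int) : Decidable (Pre_getMaximumXor nums maximumBit) := by unfold Pre_getMaximumXor; infer_instance
def pvWitness_getMaximumXor : List Int × Int := ([0, 1, 3, 2], 3)

def Spec_getMaximumXor (nums : List Int) (maximumBit : Int) (out : List Int) : Prop := out = getMaximumXor_alt nums maximumBit
instance (nums : List Int) (maximumBit : Int) (out : List Int) : Decidable (Spec_getMaximumXor nums maximumBit out) := by unfold Spec_getMaximumXor; infer_instance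

-- ===== CLAIM (what is proved, stated in full; the proofs are below) =====
def Claim_equal_getMaximumXor : Prop := ∀ (nums : List Int) (maximumBit : Int), Dom_getMaximumXor nums maximumBit → Pre_getMaximumXor nums maximumBit → Spec_getMaximumXor nums maximumBit (getMaximumXor nums maximumBit)

-- ===== LEMMAS AND PROOFS =====

-- Sign/magnitude coding of Int, used to transport Nat.xor_assoc to PySem.Int.bxor.
def pvEnc (a : Int) : Bool × Nat := (decide (a < 0), (if 0 ≤ a then a else -a - 1).toNat)
def pvDec (p : Bool × Nat) : Int := if p.1 then -(p.2 : Int) - 1 else (p.2 : Int)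

theorem pvEnc_dec (p : Bool × Nat) : pvEnc (pvDec p) = p := by
  obtain ⟨s, n⟩ := p
  cases s <;> unfold pvDec pvEnc <;> simp <;> omega

theorem bxor_enc (a b : Int) :
    PySem.Int.bxor a b = pvDec (xor (pvEnc a).1 (pvEnc b).1, (pvEnc a).2 ^^^ (pvEnc b).2) := by
  unfold PySem.Int.bxor pvEnc pvDec
  by_cases ha : 0 ≤ a <;> by_cases hb : 0 ≤ b <;>
    simp [ha, hb, show a < 0 ↔ ¬ 0 ≤ a from by omega, show b < 0 ↔ ¬ 0 ≤ b from by omega]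

theorem bxor_assoc (a b c : Int) :
    PySem.Int.bxor (PySem.Int.bxor a b) c = PySem.Int.bxor a (PySem.Int.bxor b c) := by
  rw [bxor_enc a b, bxor_enc b c, bxor_enc (pvDec _) c, bxor_enc a (pvDec _),
      pvEnc_dec, pvEnc_dec]
  simp [Nat.xor_assoc]

theorem zero_bxor (a : Int) : PySem.Int.bxor 0 a = a := by
  rw [PySem.Int.bxor_comm]; exact PySem.Int.bxor_zero a

-- pxor l = XOR of all elements of l
def pvPxor (l : List Int) : Int := l.foldl (fun x i => PySem.Int.bxor x i) 0

theorem foldl_bxor (l : List Int) (x : Int) :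
    l.foldl (fun x i => PySem.Int.bxor x i) x = PySem.Int.bxor x (pvPxor l) := by
  induction l generalizing x with
  | nil => simp [pvPxor, PySem.Int.bxor_zero]
  | cons a t ih =>
    show t.foldl _ (PySem.Int.bxor x a) = _
    rw [ih, pvPxor]
    show _ = PySem.Int.bxor x (t.foldl _ (PySem.Int.bxor 0 a))
    rw [ih (PySem.Int.bxor 0 a), zero_bxor, bxor_assoc]
    rfl

theorem pvPxor_cons (a : Int) (t : List Int) :
    pvPxor (a :: t) = PySem.Int.bxor a (pvPxor t) := by
  show t.foldl _ (PySem.Int.bxor 0 a) = _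
  rw [foldl_bxor, zero_bxor]

theorem pvPxor_append (s t : List Int) :
    pvPxor (s ++ t) = PySem.Int.bxor (pvPxor s) (pvPxor t) := by
  unfold pvPxor
  rw [List.foldl_append, foldl_bxor]
  rfl

theorem pvPxor_reverse (l : List Int) : pvPxor l.reverse = pvPxor l := by
  induction l with
  | nil => rfl
  | cons a t ih =>
    simp only [List.reverse_cons, pvPxor_append, pvPxor_cons, ih]
    rw [show pvPxor ([] : List Int) = 0 from rfl, PySem.Int.bxor_zero, PySem.Int.bxor_comm]

-- B's prefix table is the list of prefix XORs.
theorem preFold_eq (l : List Int) :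
    l.foldl (fun acc x => acc ++ [PySem.Int.bxor (acc.getLastD 0) x]) [0]
      = (List.range (l.length + 1)).map (fun j => pvPxor (l.take j)) := by
  induction l using List.reverseRecOn with
  | nil => simp [pvPxor]
  | append_singleton t y ih =>
    rw [List.foldl_append, List.foldl_cons, List.foldl_nil, ih]
    have hlast : ((List.range (t.length + 1)).map (fun j => pvPxor (t.take j))).getLastD 0
        = pvPxor t := by
      rw [List.range_succ, List.map_append]
      simp
    rw [hlast]
    rw [show (t ++ [y]).length + 1 = (t.length + 1) + 1 by simp]
    rw [List.range_succ (n := t.length + 1), List.map_append]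
    congr 1
    · apply List.map_congr_left
      intro j hj
      simp only [List.mem_range] at hj
      rw [List.take_append_of_le_length (by omega)]
    · simp only [List.map_cons, List.map_nil]
      rw [List.take_of_length_le (by simp), pvPxor_append,
          show pvPxor [y] = y from zero_bxor y]

-- A's loop, generalized: result elements are prefix XORs of the walked list, offset by the start value.
theorem loopA_eq (mask : Int) (l : List Int) (x : Int) (ans : List Int) :
    (l.foldl (fun (st : List Int × Int) n => (st.1 ++ [PySem.Int.bxor st.2 mask], PySem.Int.bxor st.2 n)) (ans, x)).1
      = ans ++ (List.range l.length).map
          (fun i => PySem.Int.bxor (PySem.Int.bxor x (pvPxor (l.take i))) mask) := by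
  induction l generalizing x ans with
  | nil => simp
  | cons a t ih =>
    rw [List.foldl_cons, ih]
    rw [List.length_cons, List.range_succ_eq_map, List.map_cons, List.map_map]
    rw [List.append_assoc, List.singleton_append]
    simp only [List.take_zero, show pvPxor ([] : List Int) = 0 from rfl, PySem.Int.bxor_zero]
    congr 1
    congr 1
    apply List.map_congr_left
    intro i _
    simp only [Function.comp_apply]
    rw [List.take_succ_cons, pvPxor_cons, ← bxor_assoc]

theorem getD_map_range (k j : Nat) (f : Nat → Int) (h : j < k) :
    ((List.range k).map f).getD j 0 = f j := by
  rw [List.getD_eq_getElem?_getD, List.getElem?_map, List.getElem?_range h]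
  rfl

theorem main_eq (nums : List Int) (maximumBit : Int) :
    getMaximumXor nums maximumBit = getMaximumXor_alt nums maximumBit := by
  unfold getMaximumXor getMaximumXor_alt
  rw [preFold_eq, loopA_eq, List.nil_append, List.length_reverse, foldl_bxor, zero_bxor]
  apply List.map_congr_left
  intro i hi
  simp only [List.mem_range] at hi
  rw [getD_map_range _ _ _ (by omega)]
  congr 1
  rw [List.take_reverse, pvPxor_reverse]
  have hsplit : nums = nums.take (nums.length - i) ++ nums.drop (nums.length - i) :=
    (List.take_append_drop _ _).symm
  calc PySem.Int.bxor (pvPxor nums) (pvPxor (nums.drop (nums.length - i)))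
      = PySem.Int.bxor (PySem.Int.bxor (pvPxor (nums.take (nums.length - i)))
          (pvPxor (nums.drop (nums.length - i)))) (pvPxor (nums.drop (nums.length - i))) := by
        have h2 : pvPxor nums
            = PySem.Int.bxor (pvPxor (nums.take (nums.length - i)))
                (pvPxor (nums.drop (nums.length - i))) := by
          conv_lhs => rw [hsplit]
          exact pvPxor_append _ _
        rw [h2]
    _ = pvPxor (nums.take (nums.length - i)) := by
        rw [bxor_assoc, PySem.Int.bxor_self, PySem.Int.bxor_zero]

-- ===== VERDICT (by name: the statement is the Claim_ definition above) =====
theorem getMaximumXor_spec : Claim_equal_getMaximumXor := by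
  intro nums maximumBit _ _
  exact main_eq nums maximumBit
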